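-- pv_equiv track=rewrite | github.com/rebibabo/static_program_analysis_by_tree_sitter | File.py | typecasting
-- ===== SOURCE A (Python) =====
-- def typecasting(type1, type2):
--     '''目的-将type1和type2进行强制类型转换'''
--     def compare(type_list1, type_list2):
--         if type1 in type_list1 and type2 in type_list2:
--             return True
--         if type1 in type_list2 and type2 in type_list1:
--             return True
--         return False
--     def unsigned(types, copy=True):
--         '''增加unsigned修饰'''
--         if copy:
--             new_types = types.copy()
--         else:
--             new_types = []
--         for type in types:
--             if type == 'int':
--                 new_types.append('unsigned')
--             new_types.append(f'unsigned {type}')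
--             new_types.append(f'{type} unsigned')
--         return new_types
--     if type1 == 'bool': # bool强制转换成int
--         type1 = 'int'
--     if type2 == 'bool':
--         type2 = 'int'
--     if compare(unsigned(['char', 'short']), unsigned(['char', 'short'])):   # char和short强制转换成int
--         return 'int'
--     elif compare(['float'], ['float']):   # float强制转换成double
--         return 'double'
--     elif type1 == type2:
--         return type1
--     elif compare(unsigned(['char', 'short']), ['int']):
--         return 'int'
--     if compare(unsigned(['char', 'short', 'int']), unsigned(['int'], copy=False)):  # unsigned类型优先级高
--         return 'unsigned int'
--     elif compare(unsigned(['char', 'short', 'int']), ['long']):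
--         return 'long'
--     elif compare(unsigned(['char', 'short', 'int', 'long']), unsigned(['long'], copy=False)):
--         return 'unsigned long'
--     elif compare(unsigned(['char', 'short', 'int', 'long']), ['long long']):
--         return 'long long'
--     elif compare(unsigned(['char', 'short', 'int', 'long', 'long long']), unsigned(['long long'], copy=False)):
--         return 'unsigned long long'
--     elif compare(unsigned(['char', 'short', 'int', 'long', 'long long']), ['float']):
--         return 'float'
--     elif compare(unsigned(['char', 'short', 'int', 'long', 'long long']) + ['float'], ['double']):
--         return 'double'
--     elif '*' in type1:  # 如果type1是指针类型，返回type1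
--         return type1
--     elif '*' in type2:
--         return type2
--     else:
--         return 'unknown'
-- ===== SOURCE B (Python) =====
-- _RANK = {
--     'char': (0, 'int'), 'short': (0, 'int'),
--     'unsigned char': (0, 'int'), 'char unsigned': (0, 'int'),
--     'unsigned short': (0, 'int'), 'short unsigned': (0, 'int'),
--     'int': (1, 'int'),
--     'unsigned': (2, 'unsigned int'), 'unsigned int': (2, 'unsigned int'),
--     'int unsigned': (2, 'unsigned int'),
--     'long': (3, 'long'),
--     'unsigned long': (4, 'unsigned long'), 'long unsigned': (4, 'unsigned long'),
--     'long long': (5, 'long long'),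
--     'unsigned long long': (6, 'unsigned long long'),
--     'long long unsigned': (6, 'unsigned long long'),
--     'float': (7, 'float'), 'double': (8, 'double'),
-- }
--
-- def typecasting(type1, type2):
--     if type1 == 'bool':
--         type1 = 'int'
--     if type2 == 'bool':
--         type2 = 'int'
--     e1 = _RANK.get(type1)
--     e2 = _RANK.get(type2)
--     if e1 is not None and e2 is not None:
--         if e1[0] == 0 and e2[0] == 0:
--             return 'int'
--         if type1 == type2:
--             return 'double' if type1 == 'float' else type1
--         return e1[1] if e1[0] >= e2[0] else e2[1]
--     if type1 == type2:
--         return type1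
--     if '*' in type1:
--         return type1
--     if '*' in type2:
--         return type2
--     return 'unknown'
-- ===== Notes on version B (the rewrite author's own statement) =====
-- stated objective: idiomatic
-- what changed: Replaces A's eleven hand-built membership-list comparisons (compare/unsigned helpers) by a single precedence table mapping each accepted type to a (rank, canonical result) pair, taking the higher-ranked operand's result name, with A's equality/pointer/unknown fallbacks.
import Mathlib
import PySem

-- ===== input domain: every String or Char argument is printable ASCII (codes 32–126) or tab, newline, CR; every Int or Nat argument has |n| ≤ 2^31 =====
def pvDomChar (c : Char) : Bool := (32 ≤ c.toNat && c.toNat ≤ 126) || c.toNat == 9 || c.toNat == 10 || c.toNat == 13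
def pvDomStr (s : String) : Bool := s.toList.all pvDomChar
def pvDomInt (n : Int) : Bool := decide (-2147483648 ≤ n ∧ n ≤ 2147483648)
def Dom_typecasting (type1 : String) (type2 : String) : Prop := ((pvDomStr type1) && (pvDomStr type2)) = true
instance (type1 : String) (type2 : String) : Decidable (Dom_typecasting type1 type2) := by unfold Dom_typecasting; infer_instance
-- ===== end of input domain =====

-- B replaces A's eleven hand-built list comparisons by one precedence table (rank, result name); same return value, plainer shape.

-- ===== PORT A =====
-- helper 'unsigned(types, copy)' of A: the for-loop is the foldl over 'types'
def pyUnsigned (types : List String) (copy : Bool) : List String :=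
  types.foldl
    (fun acc t =>
      (acc ++ (if t = "int" then ["unsigned"] else []))
        ++ ["unsigned " ++ t, t ++ " unsigned"])
    (if copy then types else [])

-- helper 'compare(type_list1, type_list2)' of A (captures the two normalized types)
def pyCompare (t1 t2 : String) (l1 l2 : List String) : Bool :=
  if t1 ∈ l1 ∧ t2 ∈ l2 then true
  else if t1 ∈ l2 ∧ t2 ∈ l1 then true
  else false

def typecasting (type1 : String) (type2 : String) : String :=
  let t1 := if type1 = "bool" then "int" else type1
  let t2 := if type2 = "bool" then "int" else type2
  if pyCompare t1 t2 (pyUnsigned ["char", "short"] true) (pyUnsigned ["char", "short"] true) then "int"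
  else if pyCompare t1 t2 ["float"] ["float"] then "double"
  else if t1 = t2 then t1
  else if pyCompare t1 t2 (pyUnsigned ["char", "short"] true) ["int"] then "int"
  else if pyCompare t1 t2 (pyUnsigned ["char", "short", "int"] true) (pyUnsigned ["int"] false) then "unsigned int"
  else if pyCompare t1 t2 (pyUnsigned ["char", "short", "int"] true) ["long"] then "long"
  else if pyCompare t1 t2 (pyUnsigned ["char", "short", "int", "long"] true) (pyUnsigned ["long"] false) then "unsigned long"
  else if pyCompare t1 t2 (pyUnsigned ["char", "short", "int", "long"] true) ["long long"] then "long long"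
  else if pyCompare t1 t2 (pyUnsigned ["char", "short", "int", "long", "long long"] true) (pyUnsigned ["long long"] false) then "unsigned long long"
  else if pyCompare t1 t2 (pyUnsigned ["char", "short", "int", "long", "long long"] true) ["float"] then "float"
  else if pyCompare t1 t2 (pyUnsigned ["char", "short", "int", "long", "long long"] true ++ ["float"]) ["double"] then "double"
  else if PySem.Str.isIn "*" t1 then t1
  else if PySem.Str.isIn "*" t2 then t2
  else "unknown"

-- ===== PORT B =====
def rankTable : PySem.Dict String (Int × String) :=
  PySem.Dict.mk
    [("char", (0, "int")), ("short", (0, "int")),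
     ("unsigned char", (0, "int")), ("char unsigned", (0, "int")),
     ("unsigned short", (0, "int")), ("short unsigned", (0, "int")),
     ("int", (1, "int")),
     ("unsigned", (2, "unsigned int")), ("unsigned int", (2, "unsigned int")),
     ("int unsigned", (2, "unsigned int")),
     ("long", (3, "long")),
     ("unsigned long", (4, "unsigned long")), ("long unsigned", (4, "unsigned long")),
     ("long long", (5, "long long")),
     ("unsigned long long", (6, "unsigned long long")),
     ("long long unsigned", (6, "unsigned long long")),
     ("float", (7, "float")), ("double", (8, "double"))]

def typecasting_alt (type1 : String) (type2 : String) : String :=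
  let t1 := if type1 = "bool" then "int" else type1
  let t2 := if type2 = "bool" then "int" else type2
  match rankTable.get? t1, rankTable.get? t2 with
  | some e1, some e2 =>
      if e1.1 = 0 ∧ e2.1 = 0 then "int"
      else if t1 = t2 then (if t1 = "float" then "double" else t1)
      else if e1.1 ≥ e2.1 then e1.2 else e2.2
  | _, _ =>
      if t1 = t2 then t1
      else if PySem.Str.isIn "*" t1 then t1
      else if PySem.Str.isIn "*" t2 then t2
      else "unknown"

-- ===== PRECONDITION & SPEC =====
def Spec_typecasting (type1 : String) (type2 : String) (out : String) : Prop := out = typecasting_alt type1 type2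
instance (type1 : String) (type2 : String) (out : String) : Decidable (Spec_typecasting type1 type2 out) := by unfold Spec_typecasting; infer_instance

-- ===== CLAIM (what is proved, stated in full; the proofs are below) =====
def Claim_equal_typecasting : Prop := ∀ (type1 : String) (type2 : String), Dom_typecasting type1 type2 → Spec_typecasting type1 type2 (typecasting type1 type2)

-- ===== LEMMAS AND PROOFS =====
-- every type string either program ever compares against
def pvTokens : List String :=
  ["char", "short", "unsigned char", "char unsigned", "unsigned short", "short unsigned",
   "int", "unsigned", "unsigned int", "int unsigned",
   "long", "unsigned long", "long unsigned",
   "long long", "unsigned long long", "long long unsigned",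
   "float", "double", "bool"]

-- A = B on the whole token grid, checked by kernel evaluation
theorem pv_grid : (pvTokens.all fun a => pvTokens.all fun b => typecasting a b == typecasting_alt a b) = true := by
  decide

-- if the second type is none of the recognized tokens, every comparison of A and the
-- table lookup of B fail, and both fall to the identical equal/pointer/unknown chain
theorem pv_right (t1 t2 : String) (h2 : t2 ∉ pvTokens) : typecasting t1 t2 = typecasting_alt t1 t2 := by
  simp only [pvTokens, List.mem_cons, List.not_mem_nil, not_or, or_false] at h2
  obtain ⟨a1,a2,a3,a4,a5,a6,a7,a8,a9,a10,a11,a12,a13,a14,a15,a16,a17,a18,a19⟩ := h2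
  simp [typecasting, typecasting_alt, pyCompare, pyUnsigned, rankTable,
    PySem.Dict.get?_mk_cons, PySem.Dict.get?, beq_iff_eq,
    a1,a2,a3,a4,a5,a6,a7,a8,a9,a10,a11,a12,a13,a14,a15,a16,a17,a18,a19,
    Ne.symm a1,Ne.symm a2,Ne.symm a3,Ne.symm a4,Ne.symm a5,Ne.symm a6,Ne.symm a7,
    Ne.symm a8,Ne.symm a9,Ne.symm a10,Ne.symm a11,Ne.symm a12,Ne.symm a13,Ne.symm a14,
    Ne.symm a15,Ne.symm a16,Ne.symm a17,Ne.symm a18,Ne.symm a19]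

-- symmetric: the first type is not a recognized token
theorem pv_left (t1 t2 : String) (h1 : t1 ∉ pvTokens) : typecasting t1 t2 = typecasting_alt t1 t2 := by
  simp only [pvTokens, List.mem_cons, List.not_mem_nil, not_or, or_false] at h1
  obtain ⟨a1,a2,a3,a4,a5,a6,a7,a8,a9,a10,a11,a12,a13,a14,a15,a16,a17,a18,a19⟩ := h1
  simp [typecasting, typecasting_alt, pyCompare, pyUnsigned, rankTable,
    PySem.Dict.get?_mk_cons, PySem.Dict.get?, beq_iff_eq,
    a1,a2,a3,a4,a5,a6,a7,a8,a9,a10,a11,a12,a13,a14,a15,a16,a17,a18,a19,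
    Ne.symm a1,Ne.symm a2,Ne.symm a3,Ne.symm a4,Ne.symm a5,Ne.symm a6,Ne.symm a7,
    Ne.symm a8,Ne.symm a9,Ne.symm a10,Ne.symm a11,Ne.symm a12,Ne.symm a13,Ne.symm a14,
    Ne.symm a15,Ne.symm a16,Ne.symm a17,Ne.symm a18,Ne.symm a19]

-- ===== VERDICT (by name: the statement is the Claim_ definition above) =====
theorem typecasting_spec : Claim_equal_typecasting := by
  intro t1 t2 _
  unfold Spec_typecasting
  by_cases h1 : t1 ∈ pvTokens
  · by_cases h2 : t2 ∈ pvTokens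
    · exact eq_of_beq (List.all_eq_true.mp (List.all_eq_true.mp pv_grid t1 h1) t2 h2)
    · exact pv_right t1 t2 h2
  · exact pv_left t1 t2 h1
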